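-- pv_equiv track=rewrite | github.com/wascus/INFOMR-assign | Step2_ShapeAnalysis.py | face_type
-- ===== SOURCE A (Python) =====
-- def face_type(faces):
--     face_types = {
--         "triangles": 0,
--         "quads": 0,
--     }
--     for face in faces:  #type of face determined based on the number of vertices
--         num_vertices = len(face)
--         if num_vertices == 3:
--             face_types["triangles"] += 1
--         elif num_vertices == 4:
--             face_types["quads"] += 1
--     return face_types
-- ===== SOURCE B (Python) =====
-- def face_type(faces):
--     # Sort the face sizes once, then obtain each count as the difference of two
--     # lower-bound binary searches on the sorted list: count(c) = lower(c+1) - lower(c).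
--     sizes = sorted(len(face) for face in faces)
--
--     def lower(a, x):
--         # index of the first element of sorted list a that is >= x
--         lo, hi = 0, len(a)
--         while lo < hi:
--             mid = (lo + hi) // 2
--             if a[mid] < x:
--                 lo = mid + 1
--             else:
--                 hi = mid
--         return lo
--
--     return {
--         "triangles": lower(sizes, 4) - lower(sizes, 3),
--         "quads": lower(sizes, 5) - lower(sizes, 4),
--     }
-- ===== Notes on version B (the rewrite author's own statement) =====
-- stated objective: alternative
-- what changed: Replaces the per-face if/elif counting loop by sort-then-binary-search: sort the face sizes once, then compute each count as the difference of two hand-written lower-bound binary searches (count(c) = lower(c+1) - lower(c)).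
import Mathlib
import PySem

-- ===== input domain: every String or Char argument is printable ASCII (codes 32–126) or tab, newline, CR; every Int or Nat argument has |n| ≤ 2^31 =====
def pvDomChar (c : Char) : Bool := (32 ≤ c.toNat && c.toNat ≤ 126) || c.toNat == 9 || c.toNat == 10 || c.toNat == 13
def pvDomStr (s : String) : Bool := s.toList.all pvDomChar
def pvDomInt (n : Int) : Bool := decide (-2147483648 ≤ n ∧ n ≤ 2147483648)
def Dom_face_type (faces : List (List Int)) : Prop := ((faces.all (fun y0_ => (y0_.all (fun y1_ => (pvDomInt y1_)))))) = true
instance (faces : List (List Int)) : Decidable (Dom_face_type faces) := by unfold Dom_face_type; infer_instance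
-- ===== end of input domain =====

-- B replaces A's per-face if/elif counting loop by sort-then-binary-search: sort the face
-- sizes once, then each count is the difference of two lower-bound binary searches
-- (objective: alternative; no speed claim).


-- ===== PORT A =====
-- the loop body of A: d["triangles"] += 1 / d["quads"] += 1 (keys always present)
def faceTypeStep (d : PySem.Dict String Int) (face : List Int) : PySem.Dict String Int :=
  let num_vertices : Int := face.length
  if num_vertices = 3 then d.insert "triangles" (d.getD "triangles" 0 + 1)
  else if num_vertices = 4 then d.insert "quads" (d.getD "quads" 0 + 1)
  else d

def face_type (faces : List (List Int)) : List (String × Int) :=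
  let face_types : PySem.Dict String Int :=
    (PySem.Dict.empty.insert "triangles" 0).insert "quads" 0
  (faces.foldl faceTypeStep face_types).items

-- ===== PORT B =====
-- Source B's 'lower(a, x)' while-loop as structural recursion on the interval width.
-- a[mid] is ported as pyGetD a mid 0: exact whenever 0 ≤ mid < len(a), which the loop
-- invariant (0 ≤ lo ≤ mid < hi ≤ len(a)) guarantees on every access Source B makes.
def lowerLoop (a : List Int) (x : Int) (lo hi : Int) : Int :=
  if h : lo < hi then
    let mid := PySem.Int.floordiv (lo + hi) 2
    if PySem.List.pyGetD a mid 0 < x then lowerLoop a x (mid + 1) hi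
    else lowerLoop a x lo mid
  else lo
termination_by (hi - lo).toNat
decreasing_by
  · simp only [PySem.Int.floordiv, Int.fdiv_eq_ediv]; norm_num; omega
  · simp only [PySem.Int.floordiv, Int.fdiv_eq_ediv]; norm_num; omega

def lowerB (a : List Int) (x : Int) : Int := lowerLoop a x 0 a.length

def face_type_alt (faces : List (List Int)) : List (String × Int) :=
  let sizes : List Int := PySem.List.sorted (faces.map (fun face => (face.length : Int))) (fun v => v)
  [("triangles", lowerB sizes 4 - lowerB sizes 3),
   ("quads", lowerB sizes 5 - lowerB sizes 4)]

-- ===== PRECONDITION & SPEC =====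
def Spec_face_type (faces : List (List Int)) (out : List (String × Int)) : Prop := out = face_type_alt faces
instance (faces : List (List Int)) (out : List (String × Int)) : Decidable (Spec_face_type faces out) := by unfold Spec_face_type; infer_instance

-- ===== CLAIM (what is proved, stated in full; the proofs are below) =====
def Claim_equal_face_type : Prop := ∀ (faces : List (List Int)), Dom_face_type faces → Spec_face_type faces (face_type faces)

-- ===== LEMMAS AND PROOFS =====

-- A's loop, characterised: the dict items are the two counts.
lemma faceType_loop_items (faces : List (List Int)) (t q : Int) :
    (faces.foldl faceTypeStep (PySem.Dict.mk [("triangles", t), ("quads", q)])).items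
    = [("triangles", t + ((faces.map (fun face => (face.length : Int))).count 3 : Int)),
       ("quads", q + ((faces.map (fun face => (face.length : Int))).count 4 : Int))] := by
  induction faces generalizing t q with
  | nil => simp
  | cons f rest ih =>
    simp only [List.foldl_cons, faceTypeStep]
    by_cases h3 : (f.length : Int) = 3
    · have : (PySem.Dict.mk [("triangles", t), ("quads", q)]).insert "triangles"
          ((PySem.Dict.mk [("triangles", t), ("quads", q)]).getD "triangles" 0 + 1)
          = PySem.Dict.mk [("triangles", t + 1), ("quads", q)] := by
        apply PySem.Dict.ext; simp [PySem.Dict.items_insert, PySem.Dict.getD_of_mem_items]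
      rw [if_pos h3, this, ih]
      simp [h3]
      ring
    · by_cases h4 : (f.length : Int) = 4
      · have : (PySem.Dict.mk [("triangles", t), ("quads", q)]).insert "quads"
            ((PySem.Dict.mk [("triangles", t), ("quads", q)]).getD "quads" 0 + 1)
            = PySem.Dict.mk [("triangles", t), ("quads", q + 1)] := by
          apply PySem.Dict.ext; simp [PySem.Dict.items_insert, PySem.Dict.getD_of_mem_items]
        rw [if_neg h3, if_pos h4, this, ih]
        simp [h4]
        ring
      · rw [if_neg h3, if_neg h4, ih]
        simp [h3, h4]

-- B's binary-search loop computes bisect_left on a sorted list.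
lemma lowerLoop_eq_bisectLeft (a : List Int) (x : Int)
    (hs : List.Pairwise (fun v w => v ≤ w) a) :
    ∀ (lo hi : Int), 0 ≤ lo → lo ≤ hi → hi ≤ a.length →
    (∀ (j : Nat) (hj : j < a.length), (j : Int) < lo → a[j] < x) →
    (∀ (j : Nat) (hj : j < a.length), hi ≤ (j : Int) → x ≤ a[j]) →
    lowerLoop a x lo hi = (PySem.List.bisectLeft a x : Int) := by
  intro lo hi
  induction hn : (hi - lo).toNat using Nat.strong_induction_on generalizing lo hi with
  | _ n ih =>
  intro h0 hlh hh hlow hhigh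
  rw [lowerLoop]
  by_cases hcmp : lo < hi
  · rw [dif_pos hcmp]
    have hmid : PySem.Int.floordiv (lo + hi) 2 = (lo + hi) / 2 := by
      simp only [PySem.Int.floordiv, Int.fdiv_eq_ediv]; norm_num
    have hml : lo ≤ (lo + hi) / 2 := by omega
    have hmh : (lo + hi) / 2 < hi := by omega
    have hmlen : ((lo + hi) / 2).toNat < a.length := by omega
    have hget : PySem.List.pyGetD a (PySem.Int.floordiv (lo + hi) 2) 0
        = a[((lo + hi) / 2).toNat] := by
      rw [hmid, PySem.List.pyGetD_of_nonneg a 0 (by omega)]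
      exact List.getD_eq_getElem a 0 hmlen
    have hpw := List.pairwise_iff_getElem.mp hs
    by_cases hlt : PySem.List.pyGetD a (PySem.Int.floordiv (lo + hi) 2) 0 < x
    · rw [if_pos hlt]
      simp only [hmid]
      refine ih ((hi - ((lo+hi)/2 + 1)).toNat) (by omega) _ _ rfl (by omega) (by omega) hh ?_ hhigh
      intro j hj hjlt
      rcases lt_or_ge j (((lo + hi) / 2).toNat) with hc | hc
      · calc a[j] ≤ a[((lo + hi) / 2).toNat] := hpw j _ hj hmlen hc
          _ < x := by rw [← hget]; exact hlt
      · have : j = ((lo + hi) / 2).toNat := by omega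
        subst this
        rw [← hget]; exact hlt
    · rw [if_neg hlt]
      rw [hget] at hlt
      rw [not_lt] at hlt
      simp only [hmid]
      refine ih ((lo+hi)/2 - lo).toNat (by omega) _ _ rfl h0 (by omega) (by omega) hlow ?_
      intro j hj hjge
      calc x ≤ a[((lo + hi) / 2).toNat] := hlt
        _ ≤ a[j] := by
          rcases eq_or_lt_of_le (show (((lo + hi) / 2).toNat : Nat) ≤ j by omega) with hc | hc
          · subst hc; exact le_refl _
          · exact hpw _ j hmlen hj hc
  · rw [dif_neg hcmp]
    -- lo = hi here; both lo.toNat and bisectLeft satisfy the lower-bound prefix property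
    have heq : lo = hi := by omega
    obtain ⟨hb1, hb2, hb3⟩ := PySem.List.bisectLeft_spec a x hs
    set k := PySem.List.bisectLeft a x with hk
    -- show lo.toNat = k by trichotomy
    rcases lt_trichotomy (lo.toNat) k with hc | hc | hc
    · exfalso
      have hjl : lo.toNat < a.length := by omega
      have h1 : a[lo.toNat] < x := hb2 lo.toNat hjl hc
      have h2 : x ≤ a[lo.toNat] := hhigh lo.toNat hjl (by omega)
      omega
    · omega
    · exfalso
      have hjl : k < a.length := by omega
      have h1 : a[k] < x := hlow k hjl (by omega)
      have h2 : x ≤ a[k] := hb3 k hjl (le_refl _)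
      omega

lemma lowerB_eq_bisectLeft (a : List Int) (x : Int)
    (hs : List.Pairwise (fun v w => v ≤ w) a) :
    lowerB a x = (PySem.List.bisectLeft a x : Int) := by
  refine lowerLoop_eq_bisectLeft a x hs 0 a.length (le_refl _) (by positivity) (le_refl _) ?_ ?_
  · intro j hj hjlt; omega
  · intro j hj hjge; omega

-- bisect_left of x on a sorted list counts the elements < x.
lemma bisectLeft_eq_countP (a : List Int) (x : Int)
    (hs : List.Pairwise (fun v w => v ≤ w) a) :
    PySem.List.bisectLeft a x = a.countP (fun v => decide (v < x)) := by
  obtain ⟨hb1, hb2, hb3⟩ := PySem.List.bisectLeft_spec a x hs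
  set k := PySem.List.bisectLeft a x with hk
  have hsplit : a = a.take k ++ a.drop k := (List.take_append_drop k a).symm
  have htake : (a.take k).countP (fun v => decide (v < x)) = k := by
    have hlen : (a.take k).length = k := List.length_take_of_le hb1
    have hall : ∀ v ∈ a.take k, (fun v => decide (v < x)) v = true := by
      intro v hv
      obtain ⟨i, hi, hvi⟩ := List.mem_iff_getElem.mp hv
      have hi' : i < k := by omega
      have hgt : (a.take k)[i] = a[i]'(by omega) := List.getElem_take
      rw [hgt] at hvi
      rw [← hvi]
      exact decide_eq_true (hb2 i (by omega) hi')
    rw [List.countP_eq_length.mpr hall, hlen]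
  have hdrop : (a.drop k).countP (fun v => decide (v < x)) = 0 := by
    apply List.countP_eq_zero.mpr
    intro v hv
    obtain ⟨i, hi, hvi⟩ := List.mem_iff_getElem.mp hv
    have hgt : (a.drop k)[i] = a[k + i]'(by simp at hi; omega) := List.getElem_drop
    rw [hgt] at hvi
    rw [← hvi]
    simp only [decide_eq_true_eq, not_lt]
    exact hb3 (k + i) (by simp at hi; omega) (by omega)
  conv_rhs => rw [hsplit]
  rw [List.countP_append, htake, hdrop]
  omega

-- counting elements in [c, c+1) of an Int list is counting occurrences of c
lemma countP_lt_succ_sub (l : List Int) (c : Int) :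
    l.countP (fun v => decide (v < c + 1)) = l.countP (fun v => decide (v < c)) + l.count c := by
  induction l with
  | nil => simp
  | cons v t ih =>
    simp only [List.countP_cons, List.count_cons, ih, beq_iff_eq]
    by_cases h1 : v < c
    · simp only [decide_eq_true_eq]
      rw [if_pos (show v < c + 1 by omega), if_pos h1, if_neg (show ¬ (v = c) by omega)]
      omega
    · by_cases h2 : v = c
      · simp only [decide_eq_true_eq]
        rw [if_pos (show v < c + 1 by omega), if_neg h1, if_pos h2]
        omega
      · simp only [decide_eq_true_eq]
        rw [if_neg (show ¬ v < c + 1 by omega), if_neg h1, if_neg h2]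
        omega

-- on a sorted list, lower(c+1) - lower(c) is the number of occurrences of c
lemma lowerB_diff_eq_count (a : List Int) (c : Int)
    (hs : List.Pairwise (fun v w => v ≤ w) a) :
    lowerB a (c + 1) - lowerB a c = (a.count c : Int) := by
  rw [lowerB_eq_bisectLeft a _ hs, lowerB_eq_bisectLeft a _ hs,
      bisectLeft_eq_countP a _ hs, bisectLeft_eq_countP a _ hs]
  have := countP_lt_succ_sub a c
  omega

-- ===== VERDICT (by name: the statement is the Claim_ definition above) =====
theorem face_type_spec : Claim_equal_face_type := by
  intro faces _
  unfold Spec_face_type face_type face_type_alt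
  have hbase : (PySem.Dict.empty.insert "triangles" (0 : Int)).insert "quads" 0
      = PySem.Dict.mk [("triangles", 0), ("quads", 0)] := by decide
  rw [hbase, faceType_loop_items]
  set sizes := faces.map (fun face => (face.length : Int)) with hsz
  have hs : List.Pairwise (fun v w : Int => v ≤ w) (PySem.List.sorted sizes (fun v => v)) :=
    PySem.List.sorted_pairwise sizes (fun v => v)
  have hperm : (PySem.List.sorted sizes (fun v => v)).Perm sizes :=
    PySem.List.sorted_perm sizes (fun v => v) false
  have h3 : lowerB (PySem.List.sorted sizes (fun v => v)) 4
      - lowerB (PySem.List.sorted sizes (fun v => v)) 3 = (sizes.count 3 : Int) := by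
    rw [show (4 : Int) = 3 + 1 by ring, lowerB_diff_eq_count _ 3 hs, hperm.count_eq]
  have h4 : lowerB (PySem.List.sorted sizes (fun v => v)) 5
      - lowerB (PySem.List.sorted sizes (fun v => v)) 4 = (sizes.count 4 : Int) := by
    rw [show (5 : Int) = 4 + 1 by ring, lowerB_diff_eq_count _ 4 hs, hperm.count_eq]
  simp [h3, h4]
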